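-- pv_equiv track=rewrite | github.com/DutchGhost/Iscip | python/week5/Forsyth-Edward.py | fen2gridgen
-- ===== SOURCE A (Python) =====
-- def fen2gridgen(fen, fill='*'):
--     lenght = len(fen.split('/')) - 1
--     for (idx, row) in enumerate(fen.split('/')):
--         for c in row:
--             if not c.isdigit():
--                 yield c
--             else:
--                 for _ in range(int(c)):
--                     yield fill
--         if idx != lenght:
--             yield "\n"
-- ===== SOURCE B (Python) =====
-- def fen2gridgen(fen, fill='*'):
--     # Single flat pass over the raw string: '/' becomes the row separator directly,
--     # so no split/enumerate/last-index bookkeeping is needed.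
--     for c in fen:
--         if c == '/':
--             yield "\n"
--         elif c.isdigit():
--             for _ in range(int(c)):
--                 yield fill
--         else:
--             yield c
-- ===== Notes on version B (the rewrite author's own statement) =====
-- stated objective: simpler
-- what changed: B replaces A's split('/')-into-rows plus enumerate/last-index newline bookkeeping with one flat pass over the raw string that emits '\n' directly for each '/'.
import Mathlib
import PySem

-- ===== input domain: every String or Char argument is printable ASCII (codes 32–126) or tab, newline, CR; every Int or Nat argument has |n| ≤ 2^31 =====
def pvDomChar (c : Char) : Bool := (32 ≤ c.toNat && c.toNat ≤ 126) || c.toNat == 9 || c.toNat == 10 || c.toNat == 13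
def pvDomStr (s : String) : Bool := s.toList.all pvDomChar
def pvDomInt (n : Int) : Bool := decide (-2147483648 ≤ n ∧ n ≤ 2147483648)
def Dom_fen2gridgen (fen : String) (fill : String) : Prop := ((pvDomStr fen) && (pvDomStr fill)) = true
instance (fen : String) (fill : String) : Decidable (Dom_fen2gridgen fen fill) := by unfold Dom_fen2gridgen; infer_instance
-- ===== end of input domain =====

-- B flattens A's split/enumerate row processing into one single pass over the raw
-- fen string ('/' ↦ "\n" directly); objective: simpler (no row list, no last-index test).


-- ===== PORT A =====
-- inner loop body of A: `if not c.isdigit(): yield c else: for _ in range(int(c)): yield fill`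
-- (`range(int(c))` yielding `fill` each time is List.replicate of int(c) copies)
def pvStepChar (fill : String) (acc : List String) (c : Char) : List String :=
  if !(PySem.Chars.isdigit c) then acc ++ [String.ofList [c]]
  else acc ++ List.replicate ((PySem.Int.ofChars? [c]).getD 0).toNat fill

def fen2gridgen (fen : String) (fill : String) : List String :=
  let rows := PySem.Chars.splitOn fen.toList ['/']   -- fen.split('/')
  let lenght : Int := (rows.length : Int) - 1
  (PySem.List.enumerate rows).foldl (fun acc p =>
    let acc2 := p.2.foldl (pvStepChar fill) acc
    if p.1 ≠ lenght then acc2 ++ ["\n"] else acc2) []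

-- ===== PORT B =====
-- per-character emission of B's single pass ('/' first, then digit expansion, then the char)
def pvG (fill : String) (c : Char) : List String :=
  if c == '/' then ["\n"]
  else if PySem.Chars.isdigit c then List.replicate ((PySem.Int.ofChars? [c]).getD 0).toNat fill
  else [String.ofList [c]]

def fen2gridgen_alt (fen : String) (fill : String) : List String :=
  fen.toList.flatMap (pvG fill)

-- ===== PRECONDITION & SPEC =====
def Spec_fen2gridgen (fen : String) (fill : String) (out : List String) : Prop := out = fen2gridgen_alt fen fill
instance (fen : String) (fill : String) (out : List String) : Decidable (Spec_fen2gridgen fen fill out) := by unfold Spec_fen2gridgen; infer_instance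

-- ===== CLAIM (what is proved, stated in full; the proofs are below) =====
def Claim_equal_fen2gridgen : Prop := ∀ (fen : String) (fill : String), Dom_fen2gridgen fen fill → Spec_fen2gridgen fen fill (fen2gridgen fen fill)

-- ===== LEMMAS AND PROOFS =====

-- per-character output of A's inner loop, as a list
def pvH (fill : String) (c : Char) : List String :=
  if !(PySem.Chars.isdigit c) then [String.ofList [c]]
  else List.replicate ((PySem.Int.ofChars? [c]).getD 0).toNat fill

def pvRowOut (fill : String) (row : List Char) : List String := row.flatMap (pvH fill)

-- reference form of split on the single separator '/'
def pvSp : List Char → List (List Char)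
  | [] => [[]]
  | c :: rest =>
      if c = '/' then [] :: pvSp rest
      else match pvSp rest with
           | [] => [[c]]
           | r :: rs => (c :: r) :: rs

-- rows joined with "\n" between them (A's enumerate/last-index logic, recursively)
def pvInterc (fill : String) : List (List Char) → List String
  | [] => []
  | [r] => pvRowOut fill r
  | r :: s :: rs => pvRowOut fill r ++ "\n" :: pvInterc fill (s :: rs)

theorem pvSp_ne_nil (l : List Char) : pvSp l ≠ [] := by
  cases l with
  | nil => simp [pvSp]
  | cons c rest =>
      simp only [pvSp]
      split
      · simp
      · cases h : pvSp rest <;> simp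

theorem pvGo_eq (fuel : Nat) : ∀ (l cur : List Char) (acc : List (List Char)),
    l.length ≤ fuel →
    PySem.Chars.splitOn.go ['/'] fuel l cur acc
      = acc.reverse ++ (pvSp l).modifyHead (cur.reverse ++ ·) := by
  induction fuel with
  | zero =>
      intro l cur acc h
      have : l = [] := by cases l <;> simp_all
      subst this
      simp [PySem.Chars.splitOn.go, pvSp]
  | succ n ih =>
      intro l cur acc h
      cases l with
      | nil => simp [PySem.Chars.splitOn.go, pvSp]
      | cons c rest =>
          simp only [PySem.Chars.splitOn.go, List.isPrefixOf]
          by_cases hc : c = '/'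
          · subst hc
            simp only [beq_self_eq_true, Bool.true_and]
            rw [if_pos (by simp)]
            rw [ih _ _ _ (by simpa using Nat.le_of_succ_le_succ h)]
            simp only [pvSp, List.reverse_cons, List.reverse_nil]
            rcases hq : pvSp rest with _ | ⟨r, rs⟩
            · exact absurd hq (pvSp_ne_nil rest)
            · simp [hq, List.modifyHead]
          · rw [if_neg (by simp; exact fun h' => hc h'.symm)]
            rw [ih _ _ _ (by simpa using Nat.le_of_succ_le_succ h)]
            simp only [pvSp, if_neg hc]
            rcases hsp : pvSp rest with _ | ⟨r, rs⟩
            · exact absurd hsp (pvSp_ne_nil rest)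
            · simp

theorem pvSplitOn_eq (l : List Char) : PySem.Chars.splitOn l ['/'] = pvSp l := by
  unfold PySem.Chars.splitOn
  rw [pvGo_eq _ _ _ _ (by omega)]
  rcases h : pvSp l with _ | ⟨r, rs⟩
  · exact absurd h (pvSp_ne_nil l)
  · simp

theorem pvRowFold (fill : String) (row : List Char) (acc : List String) :
    row.foldl (pvStepChar fill) acc = acc ++ pvRowOut fill row := by
  induction row generalizing acc with
  | nil => simp [pvRowOut]
  | cons c rest ih =>
      simp only [List.foldl_cons, ih, pvRowOut, List.flatMap_cons, pvStepChar, pvH]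
      split <;> simp

theorem pvFoldEnum (fill : String) (L : Int) :
    ∀ (rows : List (List Char)) (k : Int) (acc : List String),
      k + rows.length = L + 1 →
      (PySem.List.enumerate rows k).foldl (fun acc p =>
        let acc2 := p.2.foldl (pvStepChar fill) acc
        if p.1 ≠ L then acc2 ++ ["\n"] else acc2) acc
      = acc ++ pvInterc fill rows := by
  intro rows
  induction rows with
  | nil => intro k acc _; simp [PySem.List.enumerate, pvInterc]
  | cons r rs ih =>
      intro k acc hk
      simp only [PySem.List.enumerate, List.foldl_cons]
      cases rs with
      | nil =>
          have hkL : k = L := by simp at hk; omega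
          simp [PySem.List.enumerate, hkL, pvRowFold, pvInterc]
      | cons s rs' =>
          have hne : k ≠ L := by simp at hk; omega
          rw [ih (k + 1) _ (by simp at hk ⊢; omega)]
          simp [hne, pvRowFold, pvInterc]

theorem pvIntercSp (fill : String) (l : List Char) :
    pvInterc fill (pvSp l) = l.flatMap (pvG fill) := by
  induction l with
  | nil => simp [pvSp, pvInterc, pvRowOut]
  | cons c rest ih =>
      simp only [pvSp, List.flatMap_cons]
      by_cases hc : c = '/'
      · subst hc
        rw [if_pos rfl]
        rcases h : pvSp rest with _ | ⟨r, rs⟩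
        · exact absurd h (pvSp_ne_nil rest)
        · have hh : pvInterc fill ([] :: r :: rs)
              = pvRowOut fill [] ++ "\n" :: pvInterc fill (r :: rs) := rfl
          rw [hh, ← h, ih]
          simp [pvRowOut, pvG]
      · rw [if_neg hc]
        rcases h : pvSp rest with _ | ⟨r, rs⟩
        · exact absurd h (pvSp_ne_nil rest)
        · have hstep : pvInterc fill ((c :: r) :: rs) = pvH fill c ++ pvInterc fill (r :: rs) := by
            cases rs with
            | nil => simp [pvInterc, pvRowOut]
            | cons s rs' => simp [pvInterc, pvRowOut]
          rw [hstep, ← h, ih]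
          have hbeq : (c == '/') = false := by simp [hc]
          simp only [pvG, hbeq, Bool.false_eq_true, if_false, pvH]
          split <;> simp_all

-- ===== VERDICT (by name: the statement is the Claim_ definition above) =====
theorem fen2gridgen_spec : Claim_equal_fen2gridgen := by
  intro fen fill _
  unfold Spec_fen2gridgen fen2gridgen
  rw [pvSplitOn_eq]
  rw [pvFoldEnum fill ((pvSp fen.toList).length - 1) (pvSp fen.toList) 0 [] (by
    have h1 : 0 < (pvSp fen.toList).length := List.length_pos_iff.mpr (pvSp_ne_nil fen.toList)
    omega)]
  rw [List.nil_append, pvIntercSp]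
  rfl
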